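-- pv_equiv track=rewrite | github.com/yulilith/radiogaga | radio-agent/radioagent/preflight.py | resolve_anthropic_model_id
-- ===== SOURCE A (Python) =====
-- from typing import Any
--
-- def resolve_anthropic_model_id(requested_model: str, models: list[dict[str, Any]]) -> str:
--     available_ids = [
--         model_id
--         for item in models
--         if isinstance(item, dict)
--         for model_id in [item.get("id")]
--         if isinstance(model_id, str)
--     ]
--     if requested_model in available_ids:
--         return requested_model
--     prefix_matches = [
--         model_id for model_id in available_ids if model_id.startswith(f"{requested_model}-")
--     ]
--     if prefix_matches:
--         return prefix_matches[0]
--     return requested_model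
-- ===== SOURCE B (Python) =====
-- def resolve_anthropic_model_id(requested_model: str, models: list[dict[str, str]]) -> str:
--     prefix = f"{requested_model}-"
--     first_prefix_match = None
--     for item in models:
--         if not isinstance(item, dict):
--             continue
--         model_id = item.get("id")
--         if not isinstance(model_id, str):
--             continue
--         if model_id == requested_model:
--             return requested_model
--         if first_prefix_match is None and model_id.startswith(prefix):
--             first_prefix_match = model_id
--     return first_prefix_match if first_prefix_match is not None else requested_model
-- ===== Notes on version B (the rewrite author's own statement) =====
-- stated objective: alternative
-- what changed: Replaces the build-a-list-then-two-full-scans approach with a single fused pass that returns immediately on an exact match and records only the first prefix candidate; same O(n) cost.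
import Mathlib
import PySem

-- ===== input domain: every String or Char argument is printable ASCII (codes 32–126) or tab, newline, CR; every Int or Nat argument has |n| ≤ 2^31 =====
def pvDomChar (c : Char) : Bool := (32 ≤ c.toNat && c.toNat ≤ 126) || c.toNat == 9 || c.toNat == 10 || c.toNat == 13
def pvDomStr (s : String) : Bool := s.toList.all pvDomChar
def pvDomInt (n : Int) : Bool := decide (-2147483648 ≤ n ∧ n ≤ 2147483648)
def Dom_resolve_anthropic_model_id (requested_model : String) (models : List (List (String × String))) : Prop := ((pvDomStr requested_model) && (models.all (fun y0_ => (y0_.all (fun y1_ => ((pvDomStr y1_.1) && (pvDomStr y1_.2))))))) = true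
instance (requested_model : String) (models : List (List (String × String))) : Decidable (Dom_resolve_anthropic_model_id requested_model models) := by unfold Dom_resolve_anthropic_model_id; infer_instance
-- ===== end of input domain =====

-- B replaces A's list-comprehension plus two full scans by one fused pass with early exit; same values everywhere.

-- ===== PORT A =====
-- item.get("id") : present-and-string iff the association list has a first binding for "id"
-- (values are Strings by the type convention, so isinstance(model_id, str) is the isSome test).
def resolve_anthropic_model_id (requested_model : String) (models : List (List (String × String))) : String :=
  let available_ids := models.filterMap (fun item => (PySem.Dict.mk item).get? "id")
  if requested_model ∈ available_ids then requested_model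
  else
    let prefix_matches := available_ids.filter
      (fun model_id => PySem.Str.startswith model_id (requested_model ++ "-"))
    match prefix_matches.head? with
    | some m => m
    | none => requested_model

-- ===== PORT B =====
def resolveAltGo (requested_model pfx : String) :
    List (List (String × String)) → Option String → String
  | [], first_prefix_match => first_prefix_match.getD requested_model
  | item :: rest, first_prefix_match =>
    match (PySem.Dict.mk item).get? "id" with
    | none => resolveAltGo requested_model pfx rest first_prefix_match
    | some model_id =>
      if model_id = requested_model then requested_model
      else if first_prefix_match = none ∧ PySem.Str.startswith model_id pfx then
        resolveAltGo requested_model pfx rest (some model_id)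
      else resolveAltGo requested_model pfx rest first_prefix_match

def resolve_anthropic_model_id_alt (requested_model : String) (models : List (List (String × String))) : String :=
  resolveAltGo requested_model (requested_model ++ "-") models none

-- ===== PRECONDITION & SPEC =====
def Spec_resolve_anthropic_model_id (requested_model : String) (models : List (List (String × String))) (out : String) : Prop := out = resolve_anthropic_model_id_alt requested_model models
instance (requested_model : String) (models : List (List (String × String))) (out : String) : Decidable (Spec_resolve_anthropic_model_id requested_model models out) := by unfold Spec_resolve_anthropic_model_id; infer_instance

-- ===== CLAIM (what is proved, stated in full; the proofs are below) =====
def Claim_equal_resolve_anthropic_model_id : Prop := ∀ (requested_model : String) (models : List (List (String × String))), Dom_resolve_anthropic_model_id requested_model models → Spec_resolve_anthropic_model_id requested_model models (resolve_anthropic_model_id requested_model models)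

-- ===== LEMMAS AND PROOFS =====
-- Invariant of B's loop: with accumulator acc it computes A's answer, with acc taking
-- precedence over later prefix matches (and exact matches still winning outright).
theorem resolveAltGo_eq (r pfx : String) (ms : List (List (String × String))) :
    ∀ acc : Option String,
      resolveAltGo r pfx ms acc =
        (let ids := ms.filterMap (fun item => (PySem.Dict.mk item).get? "id")
         if r ∈ ids then r
         else ((acc.or ((ids.filter (fun m => PySem.Str.startswith m pfx)).head?)).getD r)) := by
  induction ms with
  | nil => intro acc; cases acc <;> simp [resolveAltGo]
  | cons item rest ih =>
    intro acc
    cases h : (PySem.Dict.mk item).get? "id" with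
    | none => simp [resolveAltGo, h, ih]
    | some mid =>
      by_cases hex : mid = r
      · subst hex; simp [resolveAltGo, h]
      · by_cases hpf : PySem.Chars.startswith mid.toList pfx.toList = true
        · cases acc with
          | none => simp [resolveAltGo, PySem.Str.startswith, h, hex, hpf, ih, Ne.symm hex]
          | some a => simp [resolveAltGo, PySem.Str.startswith, h, hex, hpf, ih, Ne.symm hex]
        · simp [resolveAltGo, PySem.Str.startswith, h, hex, hpf, ih, Ne.symm hex]

-- ===== VERDICT (by name: the statement is the Claim_ definition above) =====
theorem resolve_anthropic_model_id_spec : Claim_equal_resolve_anthropic_model_id := by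
  intro r ms _
  unfold Spec_resolve_anthropic_model_id
  simp only [resolve_anthropic_model_id, resolve_anthropic_model_id_alt, resolveAltGo_eq,
    Option.none_or]
  split_ifs
  · rfl
  · cases h : ((ms.filterMap (fun item => (PySem.Dict.mk item).get? "id")).filter
        (fun m => PySem.Str.startswith m (r ++ "-"))).head? <;> simp_all
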